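-- pv_equiv track=rewrite | github.com/iinteger/Codingtest | Programmers/level 2/n^2 배열 자르기.py | solution
-- ===== SOURCE A (Python) =====
-- def solution(n, left, right):
--     #     matrix = []
--     #     for i in range(1, n+1):
--     #         temp = []
--     #         for j in range(1, i):
--     #             temp.append(i)
--     #         for j in range(i, n+1):
--     #             temp.append(j)
--     #         matrix.append(temp)
--
--     #     matrix_1d = []
--     #     for row in matrix:
--     #         for item in row:
--     #             matrix_1d.append(item)
--
--     #     return matrix_1d[left:right+1]
--
--     matrix = []
--
--     for i in range(int(left), int(right + 1)):
--         j = i % n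
--
--         if i // n < j:
--             item = j + 1
--         else:
--             item = i // n + 1
--         matrix.append(item)
--
--     return matrix
-- ===== SOURCE B (Python) =====
-- def solution(n, left, right):
--     # Row-blocked construction: emit each row's constant prefix and ascending
--     # suffix in bulk, instead of computing i//n and i%n per element.
--     out = []
--     i = int(left)
--     hi = int(right + 1)
--     while i < hi:
--         r, c = divmod(i, n)
--         row_hi = min(hi, (r + 1) * n)      # one past the last index in this row
--         cend = row_hi - r * n              # one past the last column in this row
--         reps = min(cend, r + 1) - c        # columns c..min(cend,r+1)-1 hold r+1
--         if reps > 0: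
--             out.extend([r + 1] * reps)
--         out.extend(range(max(c, r + 1) + 1, cend + 1))
--         i = row_hi
--     return out
-- ===== Notes on version B (the rewrite author's own statement) =====
-- stated objective: alternative
-- what changed: A computes i//n and i%n separately for every index; B walks the slice row by row, emitting each row's constant prefix ([r+1]*reps) and ascending suffix (range(...)) in bulk, doing one divmod per row instead of per element.
-- outside the precondition, e.g. on solution(-2, 0, 3): A returns [1, 0, 1, 0], B does not finish within the time limit; on solution(0, 0, 3): A raises ZeroDivisionError, B raises ZeroDivisionError
import Mathlib
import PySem

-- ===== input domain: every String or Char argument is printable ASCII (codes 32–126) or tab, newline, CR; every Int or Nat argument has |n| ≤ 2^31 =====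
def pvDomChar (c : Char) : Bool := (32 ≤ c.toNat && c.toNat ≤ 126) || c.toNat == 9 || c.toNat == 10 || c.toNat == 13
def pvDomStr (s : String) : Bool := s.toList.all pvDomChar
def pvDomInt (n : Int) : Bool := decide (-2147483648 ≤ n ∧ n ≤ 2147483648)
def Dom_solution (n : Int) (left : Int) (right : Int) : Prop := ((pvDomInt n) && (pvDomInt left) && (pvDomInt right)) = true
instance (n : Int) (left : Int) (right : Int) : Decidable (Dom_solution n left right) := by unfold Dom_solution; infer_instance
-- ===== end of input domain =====

-- B builds the slice row by row (constant prefix + ascending suffix in bulk) instead of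
-- computing i//n and i%n per element; equal to A for all n ≥ 1 (Pre_ excludes n ≤ 0:
-- A raises ZeroDivisionError at n = 0, and for n < 0 -- outside the task's natural
-- n×n-matrix domain -- B's row walk diverges while A returns floor-division artefacts).


-- ===== PORT A =====
def solution (n : Int) (left : Int) (right : Int) : List Int :=
  (PySem.List.pyRange left (right + 1) 1).foldl
    (fun matrix i =>
      let j := PySem.Int.mod i n
      let item := if PySem.Int.floordiv i n < j then j + 1 else PySem.Int.floordiv i n + 1
      matrix ++ [item])
    []

-- ===== PORT B =====
-- while-loop of Source B as fuel recursion; each iteration advances i by ≥ 1 when n ≥ 1,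
-- so fuel (hi - lo).toNat suffices on Pre_ (it only makes the function total).
def solAltLoop (n hi : Int) : Nat → Int → List Int → List Int
  | 0, _, out => out
  | fuel + 1, i, out =>
    if i < hi then
      let r := PySem.Int.floordiv i n
      let c := PySem.Int.mod i n
      let rowHi := min hi ((r + 1) * n)
      let cend := rowHi - r * n
      let reps := min cend (r + 1) - c
      let out := if reps > 0 then out ++ List.replicate reps.toNat (r + 1) else out
      let out := out ++ PySem.List.pyRange (max c (r + 1) + 1) (cend + 1) 1
      solAltLoop n hi fuel rowHi out
    else out

def solution_alt (n : Int) (left : Int) (right : Int) : List Int :=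
  solAltLoop n (right + 1) ((right + 1) - left).toNat left []

-- ===== PRECONDITION & SPEC =====
-- Pre_ restricts to the task's natural domain (side length of an n×n matrix):
-- A raises ZeroDivisionError at n = 0, and for n < 0 A's values are floor-division
-- artefacts while B's row walk does not terminate there.
def Pre_solution (n : Int) (left : Int) (right : Int) : Prop := 1 ≤ n
instance (n : Int) (left : Int) (right : Int) : Decidable (Pre_solution n left right) := by unfold Pre_solution; infer_instance
def pvWitness_solution : Int × Int × Int := (3, 2, 5)

def Spec_solution (n : Int) (left : Int) (right : Int) (out : List Int) : Prop := out = solution_alt n left right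
instance (n : Int) (left : Int) (right : Int) (out : List Int) : Decidable (Spec_solution n left right out) := by unfold Spec_solution; infer_instance

-- ===== CLAIM (what is proved, stated in full; the proofs are below) =====
def Claim_equal_solution : Prop := ∀ (n : Int) (left : Int) (right : Int), Dom_solution n left right → Pre_solution n left right → Spec_solution n left right (solution n left right)

-- ===== LEMMAS AND PROOFS =====

-- the per-index value both programs realise
def solVal (n i : Int) : Int :=
  if PySem.Int.floordiv i n < PySem.Int.mod i n then PySem.Int.mod i n + 1
  else PySem.Int.floordiv i n + 1

theorem foldl_snoc_map (g : Int → Int) :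
    ∀ (l : List Int) (acc : List Int),
      l.foldl (fun a x => a ++ [g x]) acc = acc ++ l.map g := by
  intro l
  induction l with
  | nil => simp
  | cons x xs ih => intro acc; simp [List.foldl, ih]

theorem solution_eq_map (n left right : Int) :
    solution n left right = (PySem.List.pyRange left (right + 1) 1).map (solVal n) := by
  exact foldl_snoc_map (solVal n) _ []

theorem map_shift_pyRange (a b t : Int) :
    (PySem.List.pyRange a b 1).map (fun x => x + t) = PySem.List.pyRange (a + t) (b + t) 1 := by
  have h : b + t - (a + t) = b - a := by ring
  rw [PySem.List.pyRange_one, PySem.List.pyRange_one, h, List.map_map]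
  exact List.map_congr_left (fun k _ => by simp [Function.comp]; ring)

theorem map_const_pyRange (a b v : Int) :
    (PySem.List.pyRange a b 1).map (fun _ => v) = List.replicate (b - a).toNat v := by
  rw [PySem.List.pyRange_one, List.map_map]
  have h2 : ((fun _ => v) ∘ fun k : Nat => a + k) = fun _ => v := rfl
  rw [h2, List.map_const', List.length_range]

-- pinning floordiv/mod on a whole row
theorem floordiv_row {n r x : Int} (hn : 1 ≤ n) (h1 : r * n ≤ x) (h2 : x < (r + 1) * n) :
    PySem.Int.floordiv x n = r ∧ PySem.Int.mod x n = x - r * n := by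
  have hd : PySem.Int.floordiv x n = r :=
    (PySem.Int.floordiv_eq_iff_of_pos (by omega)).mpr ⟨h1, h2⟩
  have hm := PySem.Int.floordiv_mul_add_mod x n
  rw [hd] at hm
  exact ⟨hd, by omega⟩

theorem row_block (n r i rowHi : Int) (hn : 1 ≤ n)
    (h1 : r * n ≤ i) (h2 : i < rowHi) (h3 : rowHi ≤ (r + 1) * n) :
    (PySem.List.pyRange i rowHi 1).map (solVal n) =
      (if min (rowHi - r * n) (r + 1) - (i - r * n) > 0
        then List.replicate (min (rowHi - r * n) (r + 1) - (i - r * n)).toNat (r + 1)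
        else []) ++
      PySem.List.pyRange (max (i - r * n) (r + 1) + 1) (rowHi - r * n + 1) 1 := by
  have hg : ∀ x ∈ PySem.List.pyRange i rowHi 1,
      solVal n x = if r < x - r * n then x - r * n + 1 else r + 1 := by
    intro x hx
    rw [PySem.List.mem_pyRange_one] at hx
    obtain ⟨hd, hm⟩ := floordiv_row hn (show r * n ≤ x by omega) (show x < (r + 1) * n by omega)
    simp [solVal, hd, hm]
  rw [List.map_congr_left hg]
  by_cases hreps : min (rowHi - r * n) (r + 1) - (i - r * n) > 0
  · -- constant prefix present
    have hc : i - r * n < min (rowHi - r * n) (r + 1) := by omega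
    have hmax : max (i - r * n) (r + 1) = r + 1 := by omega
    set m := min (rowHi - r * n) (r + 1) with hm
    have hsplit : PySem.List.pyRange i rowHi 1 =
        PySem.List.pyRange i (r * n + m) 1 ++ PySem.List.pyRange (r * n + m) rowHi 1 :=
      PySem.List.pyRange_one_append i (r * n + m) rowHi (by omega) (by omega)
    rw [hsplit, List.map_append]
    have hfirst : (PySem.List.pyRange i (r * n + m) 1).map
        (fun x => if r < x - r * n then x - r * n + 1 else r + 1) =
        List.replicate (m - (i - r * n)).toNat (r + 1) := by
      have hcongr : (PySem.List.pyRange i (r * n + m) 1).map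
          (fun x => if r < x - r * n then x - r * n + 1 else r + 1) =
          (PySem.List.pyRange i (r * n + m) 1).map (fun _ => r + 1) := by
        refine List.map_congr_left ?_
        intro x hx
        rw [PySem.List.mem_pyRange_one] at hx
        have : ¬ r < x - r * n := by omega
        simp [this]
      rw [hcongr, map_const_pyRange]
      congr 1
      omega
    have hsecond : (PySem.List.pyRange (r * n + m) rowHi 1).map
        (fun x => if r < x - r * n then x - r * n + 1 else r + 1) =
        PySem.List.pyRange (r + 1 + 1) (rowHi - r * n + 1) 1 := by
      by_cases hcase : r + 1 ≤ rowHi - r * n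
      · -- m = r + 1, ascending suffix nonempty
        have hme : m = r + 1 := by omega
        have step1 : (PySem.List.pyRange (r * n + m) rowHi 1).map
            (fun x => if r < x - r * n then x - r * n + 1 else r + 1) =
            (PySem.List.pyRange (r * n + m) rowHi 1).map (fun x => x + (1 - r * n)) := by
          refine List.map_congr_left ?_
          intro x hx
          rw [PySem.List.mem_pyRange_one] at hx
          have : r < x - r * n := by omega
          simp [this]
          ring
        rw [step1, map_shift_pyRange]
        congr 1 <;> omega
      · -- m = rowHi - r*n, both sides empty
        have e1 : rowHi ≤ r * n + m := by omega
        rw [PySem.List.pyRange_one_eq_nil e1, PySem.List.pyRange_one_eq_nil (by omega)]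
        simp
    rw [hfirst, hsecond, if_pos hreps, hmax]
  · -- no constant prefix: whole row is the ascending suffix
    have hr1 : r + 1 ≤ i - r * n := by omega
    have hmax : max (i - r * n) (r + 1) = i - r * n := by omega
    have step1 : (PySem.List.pyRange i rowHi 1).map
        (fun x => if r < x - r * n then x - r * n + 1 else r + 1) =
        (PySem.List.pyRange i rowHi 1).map (fun x => x + (1 - r * n)) := by
      refine List.map_congr_left ?_
      intro x hx
      rw [PySem.List.mem_pyRange_one] at hx
      have : r < x - r * n := by omega
      simp [this]
      ring
    rw [step1, map_shift_pyRange, if_neg hreps, hmax]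
    have e1 : i + (1 - r * n) = i - r * n + 1 := by ring
    have e2 : rowHi + (1 - r * n) = rowHi - r * n + 1 := by ring
    rw [e1, e2, List.nil_append]

theorem loop_eq (n hi : Int) (hn : 1 ≤ n) :
    ∀ (fuel : Nat) (i : Int) (out : List Int), (hi - i).toNat ≤ fuel →
      solAltLoop n hi fuel i out = out ++ (PySem.List.pyRange i hi 1).map (solVal n) := by
  intro fuel
  induction fuel with
  | zero =>
    intro i out hf
    rw [PySem.List.pyRange_one_eq_nil (by omega)]
    simp [solAltLoop]
  | succ fuel ih =>
    intro i out hf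
    by_cases hlt : i < hi
    · have hbounds := (PySem.Int.floordiv_eq_iff_of_pos
        (a := i) (b := n) (q := PySem.Int.floordiv i n) (by omega)).mp rfl
      set r := PySem.Int.floordiv i n with hr
      have hmod : PySem.Int.mod i n = i - r * n := (floordiv_row hn hbounds.1 hbounds.2).2
      set rowHi := min hi ((r + 1) * n) with hrw
      have hir : i < rowHi := by omega
      simp only [solAltLoop, if_pos hlt, ← hr, ← hrw]
      rw [ih rowHi _ (by omega),
        PySem.List.pyRange_one_append i rowHi hi (by omega) (by omega), List.map_append,
        row_block n r i rowHi hn hbounds.1 hir (by omega), hmod]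
      split_ifs <;> simp
    · rw [solAltLoop, if_neg hlt, PySem.List.pyRange_one_eq_nil (by omega)]
      simp

-- ===== VERDICT (by name: the statement is the Claim_ definition above) =====
theorem solution_spec : Claim_equal_solution := by
  intro n left right _ hn
  unfold Spec_solution solution_alt
  rw [solution_eq_map, loop_eq n (right + 1) hn _ left [] le_rfl]
  simp
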